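-- pv_equiv track=rewrite | github.com/wangshoujunnew/Seq2Seq_NMT | data_process.py | sort_text_based_on_number_of_words
-- ===== SOURCE A (Python) =====
-- min_line_length = 2  # Minimum number of words required to be in training
--
-- def sort_text_based_on_number_of_words(sources, targets, max_line_length):
--     # Sort sources and targets by the length of sources.
--     # This will reduce the amount of padding during training
--     # Which should speed up training and help to reduce the loss
--
--     sorted_sources = []
--     sorted_targets = []
--
--     for length in range(min_line_length, max_line_length):
--         for i, ques in enumerate(sources):
--             ques_tmp = ques.split(" ")
--             if len(ques_tmp) == length:
--                 sorted_sources.append(sources[i])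
--                 sorted_targets.append(targets[i])
--
--     return sorted_sources, sorted_targets
-- ===== SOURCE B (Python) =====
-- min_line_length = 2  # Minimum number of words required to be in training
--
-- def sort_text_based_on_number_of_words(sources, targets, max_line_length):
--     # Bucket the source indices by word count in ONE pass, then emit the
--     # buckets in increasing word count for the admitted lengths.
--     buckets = {}
--     for i, ques in enumerate(sources):
--         buckets.setdefault(len(ques.split(" ")), []).append(i)
--
--     sorted_sources = []
--     sorted_targets = []
--     for length in sorted(buckets):
--         if min_line_length <= length < max_line_length:
--             for i in buckets[length]:
--                 sorted_sources.append(sources[i])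
--                 sorted_targets.append(targets[i])
--     return sorted_sources, sorted_targets
-- ===== Notes on version B (the rewrite author's own statement) =====
-- stated objective: faster
-- what changed: Instead of re-scanning and re-splitting every source once per candidate length in range(2, max_line_length), B splits each source once, buckets the source indices by word count in a single pass, and concatenates the in-range buckets in increasing word count; like A it indexes targets[i], so it raises exactly where A does on misaligned lists.
import Mathlib
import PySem

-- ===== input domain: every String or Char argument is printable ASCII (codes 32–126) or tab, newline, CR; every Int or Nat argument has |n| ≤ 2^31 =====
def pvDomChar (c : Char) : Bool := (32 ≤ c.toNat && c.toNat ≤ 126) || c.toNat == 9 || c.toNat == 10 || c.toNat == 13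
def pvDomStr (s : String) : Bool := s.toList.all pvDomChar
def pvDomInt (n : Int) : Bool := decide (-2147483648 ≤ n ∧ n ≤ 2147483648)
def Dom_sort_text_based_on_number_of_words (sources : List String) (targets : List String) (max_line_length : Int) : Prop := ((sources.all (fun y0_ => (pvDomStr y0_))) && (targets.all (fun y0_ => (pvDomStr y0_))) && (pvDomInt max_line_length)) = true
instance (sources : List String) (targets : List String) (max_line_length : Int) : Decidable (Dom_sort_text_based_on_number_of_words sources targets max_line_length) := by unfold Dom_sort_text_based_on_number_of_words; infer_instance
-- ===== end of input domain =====

-- B buckets the source indices by source word count in one pass and concatenates the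
-- buckets for lengths 2..max-1, replacing A's rescan of all sources per candidate length.


-- number of words of s under s.split(" ")  (split? is total here: the separator is nonempty)
def pvKey (s : String) : Int := (((PySem.Str.split? s " ").getD []).length : Int)

-- ===== PORT A =====
def sort_text_based_on_number_of_words (sources : List String) (targets : List String) (max_line_length : Int) : List String × List String :=
  (PySem.List.pyRange 2 max_line_length 1).foldl
    (fun acc length =>
      (PySem.List.enumerate sources 0).foldl
        (fun acc iq =>
          let ques_tmp := (PySem.Str.split? iq.2 " ").getD []
          if (ques_tmp.length : Int) = length then
            (acc.1 ++ [PySem.List.pyGetD sources iq.1 ""],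
             acc.2 ++ [PySem.List.pyGetD targets iq.1 ""])
          else acc)
        acc)
    ([], [])

-- ===== PORT B =====
def sort_text_based_on_number_of_words_alt (sources : List String) (targets : List String) (max_line_length : Int) : List String × List String :=
  let buckets : PySem.Dict Int (List Int) :=
    (PySem.List.enumerate sources 0).foldl
      (fun d iq => d.modify (pvKey iq.2) [] (· ++ [iq.1])) PySem.Dict.empty
  (PySem.List.sorted buckets.keys (fun k => k) false).foldl
    (fun acc length =>
      if 2 ≤ length ∧ length < max_line_length then
        (buckets.getD length []).foldl
          (fun acc i =>
            (acc.1 ++ [PySem.List.pyGetD sources i ""],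
             acc.2 ++ [PySem.List.pyGetD targets i ""])) acc
      else acc)
    ([], [])

-- ===== PRECONDITION & SPEC =====
-- Pre_ excludes exactly the inputs where the Python raises IndexError (A and B alike):
-- some source whose word count lies in [2, max_line_length) sits at an index not covered by targets.
def Pre_sort_text_based_on_number_of_words (sources : List String) (targets : List String) (max_line_length : Int) : Prop :=
  ∀ i : Nat, i < sources.length →
    2 ≤ pvKey (sources.getD i "") → pvKey (sources.getD i "") < max_line_length →
    i < targets.length
instance (sources : List String) (targets : List String) (max_line_length : Int) : Decidable (Pre_sort_text_based_on_number_of_words sources targets max_line_length) := by unfold Pre_sort_text_based_on_number_of_words; infer_instance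

def pvWitness_sort_text_based_on_number_of_words : List String × List String × Int := (["a b", "c"], ["x y", "z"], 3)

def Spec_sort_text_based_on_number_of_words (sources : List String) (targets : List String) (max_line_length : Int) (out : List String × List String) : Prop := out = sort_text_based_on_number_of_words_alt sources targets max_line_length
instance (sources : List String) (targets : List String) (max_line_length : Int) (out : List String × List String) : Decidable (Spec_sort_text_based_on_number_of_words sources targets max_line_length out) := by unfold Spec_sort_text_based_on_number_of_words; infer_instance

-- ===== CLAIM (what is proved, stated in full; the proofs are below) =====
def Claim_equal_sort_text_based_on_number_of_words : Prop := ∀ (sources : List String) (targets : List String) (max_line_length : Int), Dom_sort_text_based_on_number_of_words sources targets max_line_length → Pre_sort_text_based_on_number_of_words sources targets max_line_length → Spec_sort_text_based_on_number_of_words sources targets max_line_length (sort_text_based_on_number_of_words sources targets max_line_length)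

-- ===== LEMMAS AND PROOFS =====

-- the enumerate entries whose source has word count L, their indices, and the emitted pairs
def pvFlt (ss : List String) (L : Int) : List (Int × String) :=
  (PySem.List.enumerate ss 0).filter (fun iq => pvKey iq.2 == L)

def pvIdx (ss : List String) (L : Int) : List Int := (pvFlt ss L).map (·.1)

def pvH (ss ts : List String) (L : Int) : List (String × String) :=
  (pvIdx ss L).map (fun i => (PySem.List.pyGetD ss i "", PySem.List.pyGetD ts i ""))

-- proof-side name for B's bucket dictionary
def pvBuckets (sources : List String) : PySem.Dict Int (List Int) :=
  (PySem.List.enumerate sources 0).foldl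
    (fun d iq => d.modify (pvKey iq.2) [] (· ++ [iq.1])) PySem.Dict.empty

-- cons-step of Python indexing at a successor natural index
theorem pv_pyGetD_cons_succ {α : Type} (x : α) (l : List α) (k : Nat) (d : α) :
    PySem.List.pyGetD (x :: l) ((k : Int) + 1) d = PySem.List.pyGetD l (k : Int) d := by
  have h : ((k : Int) + 1) = (((k + 1 : Nat) : Int)) := by push_cast; ring
  rw [h, PySem.List.pyGetD_natCast, PySem.List.pyGetD_natCast]
  simp [List.getD]

-- tail-step of Python indexing, total in the list
theorem pv_pyGetD_tail_succ {α : Type} (l : List α) (k : Nat) (d : α) :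
    PySem.List.pyGetD l ((k : Int) + 1) d = PySem.List.pyGetD l.tail (k : Int) d := by
  cases l with
  | nil => simp [PySem.List.pyGetD, PySem.List.pyGet?, PySem.List.pyIdx?]
  | cons x l => exact pv_pyGetD_cons_succ x l k d

-- enumerate with a shifted start, as a map
theorem pv_enumerate_shift {α : Type} (xs : List α) (n : Int) :
    PySem.List.enumerate xs (n + 1)
      = (PySem.List.enumerate xs n).map (fun p => (p.1 + 1, p.2)) := by
  induction xs generalizing n with
  | nil => simp [PySem.List.enumerate_nil]
  | cons x xs ih => simp [PySem.List.enumerate_cons, ih]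

-- a fold over enumerate(xs, n+1) is a fold over enumerate(xs, n) with the index shifted
theorem pv_foldl_enumerate_shift {α β : Type} (xs : List α) (n : Int)
    (f : β → Int × α → β) (acc : β) :
    (PySem.List.enumerate xs (n + 1)).foldl f acc
      = (PySem.List.enumerate xs n).foldl (fun a p => f a (p.1 + 1, p.2)) acc := by
  rw [pv_enumerate_shift, List.foldl_map]

-- every index collected in pvIdx is a natural number
theorem pv_mem_pvIdx {ss : List String} {L i : Int} (h : i ∈ pvIdx ss L) :
    ∃ k : Nat, i = (k : Int) := by
  obtain ⟨p, hp, rfl⟩ := List.mem_map.1 h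
  have hp' := List.mem_filter.1 hp
  rcases (PySem.List.mem_enumerate_iff _ _ _).1 hp'.1 with ⟨k, hk, rfl⟩
  exact ⟨k, by simp⟩

-- structural step of pvIdx
theorem pv_pvIdx_cons (s : String) (ss : List String) (L : Int) :
    pvIdx (s :: ss) L
      = (if pvKey s = L then [(0 : Int)] else []) ++ (pvIdx ss L).map (· + 1) := by
  unfold pvIdx pvFlt
  rw [PySem.List.enumerate_cons, pv_enumerate_shift]
  by_cases hs : pvKey s = L
  · simp [hs, List.filter_map, List.map_map, Function.comp_def]
  · simp [hs, List.filter_map, List.map_map, Function.comp_def]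

-- structural step of pvH
theorem pv_pvH_cons (s : String) (ss ts : List String) (L : Int) :
    pvH (s :: ss) ts L
      = (if pvKey s = L then [(s, PySem.List.pyGetD ts 0 "")] else []) ++ pvH ss ts.tail L := by
  unfold pvH
  rw [pv_pvIdx_cons]
  rw [List.map_append, List.map_map]
  congr 1
  · by_cases hs : pvKey s = L
    · simp [hs, PySem.List.pyGetD_zero]
    · simp [hs]
  · refine List.map_congr_left ?_
    intro i hi
    obtain ⟨k, rfl⟩ := pv_mem_pvIdx hi
    simp [pv_pyGetD_tail_succ]

-- A's inner loop for a fixed target length L emits exactly pvH's pairs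
theorem pv_innerA_eq (L : Int) :
    ∀ (ss ts : List String) (acc : List String × List String),
      (PySem.List.enumerate ss 0).foldl
        (fun acc iq =>
          if (pvKey iq.2 = L) then
            (acc.1 ++ [PySem.List.pyGetD ss iq.1 ""],
             acc.2 ++ [PySem.List.pyGetD ts iq.1 ""])
          else acc) acc
      = (acc.1 ++ ((pvH ss ts L).map (·.1)), acc.2 ++ ((pvH ss ts L).map (·.2))) := by
  intro ss
  induction ss with
  | nil => intro ts acc; simp [PySem.List.enumerate_nil, pvH, pvIdx, pvFlt]
  | cons s ss ih =>
    intro ts acc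
    rw [PySem.List.enumerate_cons]
    simp only [List.foldl_cons]
    rw [pv_foldl_enumerate_shift]
    refine ((PySem.List.foldl_congr_mem _ _
      (fun (a : List String × List String) (iq : Int × String) =>
        if (pvKey iq.2 = L) then
          (a.1 ++ [PySem.List.pyGetD ss iq.1 ""],
           a.2 ++ [PySem.List.pyGetD ts.tail iq.1 ""])
        else a) _ ?_).trans ?_)
    · intro a p hp
      rcases (PySem.List.mem_enumerate_iff _ _ _).1 hp with ⟨k, hk, rfl⟩
      simp [zero_add, pv_pyGetD_tail_succ]
    · rw [ih ts.tail]
      rw [pv_pvH_cons]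
      by_cases hs : pvKey s = L
      · simp [hs, PySem.List.pyGetD_zero_cons]
      · simp [hs]

-- B's bucket for key L holds exactly the matching source indices, in order
theorem pv_bucket_getD (sources : List String) (L : Int) :
    ((PySem.List.enumerate sources 0).foldl
        (fun d iq => d.modify (pvKey iq.2) [] (· ++ [iq.1])) PySem.Dict.empty).getD L []
      = pvIdx sources L := by
  have h : (PySem.List.enumerate sources 0).foldl
      (fun d iq => d.modify (pvKey iq.2) [] (· ++ [iq.1])) PySem.Dict.empty
      = ((PySem.List.enumerate sources 0).map (fun iq => (pvKey iq.2, iq.1))).foldl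
          (fun d q => d.modify q.1 [] (· ++ [q.2])) PySem.Dict.empty := by
    simp [List.foldl_map]
  rw [h, PySem.Dict.getD_foldl_modify_append]
  simp [pvIdx, pvFlt, List.filter_map, Function.comp_def]

-- the bucket keys are exactly the word counts occurring among the sources
theorem pv_keys_eq (sources : List String) :
    (pvBuckets sources).keys
      = PySem.Set.ofList ((PySem.List.enumerate sources 0).map (fun iq => pvKey iq.2)) := by
  unfold pvBuckets
  rw [PySem.Dict.keys_foldl_modify_key (PySem.List.enumerate sources 0) (fun iq => pvKey iq.2)
    ([] : List Int) (fun _ iq xs => xs ++ [iq.1]) PySem.Dict.empty]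
  rfl

theorem pv_keys_nodup (sources : List String) : (pvBuckets sources).keys.Nodup := by
  rw [pv_keys_eq]; exact PySem.Set.nodup_ofList _

theorem pv_keys_mem (sources targets : List String) (L : Int) :
    L ∈ (pvBuckets sources).keys ↔ pvH sources targets L ≠ [] := by
  rw [pv_keys_eq, PySem.Set.mem_ofList]
  have hne : pvH sources targets L ≠ [] ↔ pvFlt sources L ≠ [] := by
    unfold pvH pvIdx; simp
  rw [hne]
  constructor
  · intro hmem hnil
    obtain ⟨p, hp, hpk⟩ := List.mem_map.1 hmem
    have := List.filter_eq_nil_iff.1 hnil p hp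
    simp [hpk] at this
  · intro hne'
    obtain ⟨x, hx⟩ := List.exists_mem_of_ne_nil _ hne'
    obtain ⟨hxz, hxk⟩ := List.mem_filter.1 hx
    exact List.mem_map.2 ⟨x, hxz, by simpa using hxk⟩

-- dropping the lengths with empty contribution does not change a concatenation
theorem pv_flatMap_filter {α : Type} (G : Int → List α) (l : List Int) :
    l.flatMap G = (l.filter (fun L => !(G L).isEmpty)).flatMap G := by
  induction l with
  | nil => simp
  | cons x xs ih =>
    by_cases h : G x = []
    · simp [h, ih]
    · simp [h, ih]

-- a fold concatenating per-length blocks into the two accumulators is a flatMap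
theorem pv_concat_fold (G : Int → List (String × String)) (l : List Int)
    (acc : List String × List String) :
    l.foldl (fun acc L => (acc.1 ++ (G L).map (·.1), acc.2 ++ (G L).map (·.2))) acc
      = (acc.1 ++ (l.flatMap G).map (·.1), acc.2 ++ (l.flatMap G).map (·.2)) := by
  induction l generalizing acc with
  | nil => simp
  | cons x xs ih => simp [ih]

-- emitting a list of pairs into the two accumulators appends the two projections
theorem pv_pairs_fold (ps : List (String × String)) (acc : List String × List String) :
    ps.foldl (fun acc p => (acc.1 ++ [p.1], acc.2 ++ [p.2])) acc
      = (acc.1 ++ ps.map (·.1), acc.2 ++ ps.map (·.2)) := by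
  induction ps generalizing acc with
  | nil => simp
  | cons p ps ih => simp [ih]

-- scanning range(2, max) and scanning the sorted in-range bucket keys concatenate
-- the same per-length blocks
theorem pv_range_keys (sources targets : List String) (mx : Int) :
    (PySem.List.pyRange 2 mx 1).flatMap (pvH sources targets)
      = ((PySem.List.sorted (pvBuckets sources).keys (fun k => k) false).filter
          (fun L => decide (2 ≤ L ∧ L < mx))).flatMap (pvH sources targets) := by
  rw [pv_flatMap_filter (pvH sources targets) (PySem.List.pyRange 2 mx 1),
      pv_flatMap_filter (pvH sources targets)
        ((PySem.List.sorted (pvBuckets sources).keys (fun k => k) false).filter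
          (fun L => decide (2 ≤ L ∧ L < mx)))]
  congr 1
  have hsnd : (PySem.List.sorted (pvBuckets sources).keys (fun k => k) false).Nodup :=
    (PySem.List.sorted_perm _ _ _).nodup_iff.2 (pv_keys_nodup sources)
  have hslt : (PySem.List.sorted (pvBuckets sources).keys (fun k => k) false).Pairwise (· < ·) :=
    ((PySem.List.sorted_pairwise (pvBuckets sources).keys (fun k => k)).and hsnd).imp
      (fun h => lt_of_le_of_ne h.1 h.2)
  have h1lt : ((PySem.List.pyRange 2 mx 1).filter (fun L => !(pvH sources targets L).isEmpty)).Pairwise (· < ·) :=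
    (PySem.List.pairwise_lt_pyRange_one 2 mx).filter _
  have h2lt : (((PySem.List.sorted (pvBuckets sources).keys (fun k => k) false).filter
      (fun L => decide (2 ≤ L ∧ L < mx))).filter (fun L => !(pvH sources targets L).isEmpty)).Pairwise (· < ·) :=
    (hslt.filter _).filter _
  have hperm : ((PySem.List.pyRange 2 mx 1).filter (fun L => !(pvH sources targets L).isEmpty)).Perm
      (((PySem.List.sorted (pvBuckets sources).keys (fun k => k) false).filter
        (fun L => decide (2 ≤ L ∧ L < mx))).filter (fun L => !(pvH sources targets L).isEmpty)) := by
    rw [List.perm_ext_iff_of_nodup (h1lt.imp ne_of_lt) (h2lt.imp ne_of_lt)]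
    intro a
    simp only [List.mem_filter, PySem.List.mem_pyRange_one, Bool.not_eq_eq_eq_not,
      Bool.not_true, List.isEmpty_eq_false_iff, decide_eq_true_eq,
      (PySem.List.sorted_perm (pvBuckets sources).keys (fun k => k) false).mem_iff,
      pv_keys_mem sources targets]
    tauto
  exact PySem.List.eq_of_perm_of_pairwise_le_of_injective (fun x : Int => x)
    (fun _ _ h => h) hperm (h1lt.imp le_of_lt) (h2lt.imp le_of_lt)

-- ===== VERDICT (by name: the statement is the Claim_ definition above) =====
theorem sort_text_based_on_number_of_words_spec : Claim_equal_sort_text_based_on_number_of_words := by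
  intro sources targets max_line_length _ _
  unfold Spec_sort_text_based_on_number_of_words
  unfold sort_text_based_on_number_of_words sort_text_based_on_number_of_words_alt
  simp only []
  have hk : ∀ s : String, ((((PySem.Str.split? s " ").getD []).length : Nat) : Int) = pvKey s :=
    fun _ => rfl
  simp only [hk]
  -- A's side: per length, the inner scan emits the matching pairs
  refine ((PySem.List.foldl_congr_mem _ _
    (fun (acc : List String × List String) (length : Int) =>
      (acc.1 ++ ((pvH sources targets length).map (·.1)),
       acc.2 ++ ((pvH sources targets length).map (·.2)))) _ ?_).trans ?_)
  · intro acc L _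
    exact pv_innerA_eq L sources targets acc
  -- B's side: per kept key, the bucket holds the matching indices
  symm
  rw [PySem.List.foldl_congr_mem
    (PySem.List.sorted ((PySem.List.enumerate sources 0).foldl
      (fun d iq => d.modify (pvKey iq.2) [] (· ++ [iq.1])) (PySem.Dict.empty : PySem.Dict Int (List Int))).keys (fun k => k) false)
    (fun (acc : List String × List String) (length : Int) =>
      if 2 ≤ length ∧ length < max_line_length then
        (((PySem.List.enumerate sources 0).foldl
            (fun d iq => d.modify (pvKey iq.2) [] (· ++ [iq.1])) (PySem.Dict.empty : PySem.Dict Int (List Int))).getD length []).foldl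
          (fun acc i =>
            (acc.1 ++ [PySem.List.pyGetD sources i ""],
             acc.2 ++ [PySem.List.pyGetD targets i ""])) acc
      else acc)
    (fun (acc : List String × List String) (length : Int) =>
      if 2 ≤ length ∧ length < max_line_length then
        (acc.1 ++ ((pvH sources targets length).map (·.1)),
         acc.2 ++ ((pvH sources targets length).map (·.2)))
      else acc)
    ([], [])
    (by
      intro acc L _
      by_cases hc : 2 ≤ L ∧ L < max_line_length
      · simp only [if_pos hc]
        rw [pv_bucket_getD]
        rw [show (pvIdx sources L).foldl
              (fun (acc : List String × List String) i =>
                (acc.1 ++ [PySem.List.pyGetD sources i ""],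
                 acc.2 ++ [PySem.List.pyGetD targets i ""])) acc
            = (pvH sources targets L).foldl
                (fun acc p => (acc.1 ++ [p.1], acc.2 ++ [p.2])) acc from
          by unfold pvH; rw [List.foldl_map]]
        rw [pv_pairs_fold]
      · simp only [if_neg hc])]
  rw [PySem.List.foldl_ite_eq_foldl_filter
    (p := fun length => 2 ≤ length ∧ length < max_line_length)
    (f := fun (acc : List String × List String) (length : Int) =>
      (acc.1 ++ ((pvH sources targets length).map (·.1)),
       acc.2 ++ ((pvH sources targets length).map (·.2))))]
  simp only [pv_concat_fold]
  rw [show ((PySem.List.enumerate sources 0).foldl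
      (fun d iq => d.modify (pvKey iq.2) [] (· ++ [iq.1])) (PySem.Dict.empty : PySem.Dict Int (List Int)))
      = pvBuckets sources from rfl,
    pv_range_keys sources targets max_line_length]
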